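-- pv_equiv track=rewrite | github.com/aniaodoj66/WDI | zbiór zadań/zestaw 4/zad168.py | rezystory
-- ===== SOURCE A (Python) =====
-- def rezystory(x, T, i = 0, wybrane = 0):
--
--     if wybrane == x:
--         return True
--
--     if i == len(T):
--         return False
--
--     opcja1 = rezystory(x, T, i + 1, wybrane + T[i])
--     if opcja1:
--         return True
--
--     opcja2 = rezystory(x, T, i + 1, wybrane - T[i])
--     if opcja2:
--         return True
--
--     opcja3 = rezystory(x, T, i + 1, wybrane)
--     if opcja3:
--         return True
--
--     return False
-- ===== SOURCE B (Python) =====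
-- def rezystory(x, T, i = 0, wybrane = 0):
--     reachable = {wybrane}
--     for j in range(i, len(T)):
--         if x in reachable:
--             return True
--         t = T[j]
--         reachable = {s + d for s in reachable for d in (t, -t, 0)}
--     return x in reachable
-- ===== Notes on version B (the rewrite author's own statement) =====
-- stated objective: alternative
-- what changed: A's three-way recursion (+T[i], -T[i], skip at every index) is replaced by one left-to-right pass that maintains the set of reachable signed partial sums, with the same early exit as soon as the target is in the set.
import Mathlib
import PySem

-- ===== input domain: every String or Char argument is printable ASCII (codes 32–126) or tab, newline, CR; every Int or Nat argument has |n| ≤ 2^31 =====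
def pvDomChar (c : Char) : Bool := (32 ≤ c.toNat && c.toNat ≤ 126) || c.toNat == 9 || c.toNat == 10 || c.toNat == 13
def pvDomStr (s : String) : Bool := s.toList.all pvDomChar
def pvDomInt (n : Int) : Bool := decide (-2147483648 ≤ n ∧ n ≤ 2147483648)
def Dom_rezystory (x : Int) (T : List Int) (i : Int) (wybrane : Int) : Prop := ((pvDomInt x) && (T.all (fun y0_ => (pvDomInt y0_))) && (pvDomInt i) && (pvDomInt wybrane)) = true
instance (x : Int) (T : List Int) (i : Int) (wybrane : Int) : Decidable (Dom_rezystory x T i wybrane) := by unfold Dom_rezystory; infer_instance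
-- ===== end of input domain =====

-- B replaces A's three-way recursion (+T[i], -T[i], skip) by a single left-to-right
-- pass maintaining the set of reachable signed partial sums (an alternative, DP-style algorithm).

-- ===== PORT A =====
def rezystory (x : Int) (T : List Int) (i : Int) (wybrane : Int) : Bool :=
  if wybrane = x then true
  else if i = (T.length : Int) then false
  else
    match h : PySem.List.pyGet? T i with
    | none => false  -- Python raises IndexError here; excluded by Pre_rezystory
    | some t =>
      if rezystory x T (i + 1) (wybrane + t) then true
      else if rezystory x T (i + 1) (wybrane - t) then true
      else if rezystory x T (i + 1) wybrane then true
      else false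
termination_by ((T.length : Int) - i).toNat
decreasing_by
  all_goals
    have hin : PySem.Raise.InRange T.length i := by
      by_contra hc
      rw [← PySem.List.pyGet?_eq_none_iff] at hc
      simp [hc] at h
    obtain ⟨_, h2⟩ := hin
    omega

-- ===== PORT B =====
-- one DP step: {s + d for s in reach for d in (t, -t, 0)}
def rezyStep (t : Int) (reach : PySem.Set Int) : PySem.Set Int :=
  PySem.Set.ofList (reach.flatMap (fun s => [s + t, s - t, s]))

def rezyGo (x : Int) (T : List Int) : List Int → PySem.Set Int → Bool
  | [], reach => PySem.Set.contains reach x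
  | j :: js, reach =>
    if PySem.Set.contains reach x then true
    else
      match PySem.List.pyGet? T j with
      | none => false  -- Python raises IndexError here; excluded by Pre_rezystory
      | some t => rezyGo x T js (rezyStep t reach)

def rezystory_alt (x : Int) (T : List Int) (i : Int) (wybrane : Int) : Bool :=
  rezyGo x T (PySem.List.pyRange i (T.length : Int) 1) (PySem.Set.ofList [wybrane])

-- ===== PRECONDITION & SPEC =====
-- Pre_ excludes exactly the inputs on which A raises IndexError (index i outside
-- Python's valid range with wybrane ≠ x); A returns normally on every input admitted.
def Pre_rezystory (x : Int) (T : List Int) (i : Int) (wybrane : Int) : Prop :=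
  wybrane = x ∨ (-(T.length : Int) ≤ i ∧ i ≤ (T.length : Int))
instance (x : Int) (T : List Int) (i : Int) (wybrane : Int) : Decidable (Pre_rezystory x T i wybrane) := by unfold Pre_rezystory; infer_instance

def pvWitness_rezystory : Int × List Int × Int × Int := (3, [1, 2], 0, 0)

def Spec_rezystory (x : Int) (T : List Int) (i : Int) (wybrane : Int) (out : Bool) : Prop := out = rezystory_alt x T i wybrane
instance (x : Int) (T : List Int) (i : Int) (wybrane : Int) (out : Bool) : Decidable (Spec_rezystory x T i wybrane out) := by unfold Spec_rezystory; infer_instance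

-- ===== CLAIM (what is proved, stated in full; the proofs are below) =====
def Claim_equal_rezystory : Prop := ∀ (x : Int) (T : List Int) (i : Int) (wybrane : Int), Dom_rezystory x T i wybrane → Pre_rezystory x T i wybrane → Spec_rezystory x T i wybrane (rezystory x T i wybrane)

-- ===== LEMMAS AND PROOFS =====

-- the ±/skip reachability relation on a plain list of elements
def rezySpec (x : Int) : List Int → Int → Bool
  | [], w => w == x
  | t :: ts, w => w == x || rezySpec x ts (w + t) || rezySpec x ts (w - t) || rezySpec x ts w

-- the elements A visits from index i on
def rezyElems (T : List Int) (i : Int) : List Int :=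
  (PySem.List.pyRange i (T.length : Int) 1).map (fun j => (PySem.List.pyGet? T j).getD 0)

theorem rezystory_eq_spec (x : Int) (T : List Int) :
    ∀ i w, -(T.length : Int) ≤ i → i ≤ (T.length : Int) →
      rezystory x T i w = rezySpec x (rezyElems T i) w := by
  have key : ∀ (k : Nat) (i w : Int), i = (T.length : Int) - k → -(T.length : Int) ≤ i →
      rezystory x T i w = rezySpec x (rezyElems T i) w := by
    intro k
    induction k with
    | zero =>
      intro i w hi _
      have hi' : i = (T.length : Int) := by omega
      subst hi'
      rw [rezystory]
      simp [rezyElems, PySem.List.pyRange_one_eq_nil (le_refl _), rezySpec]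
      by_cases hw : w = x <;> simp [hw]
    | succ k ih =>
      intro i w hi hlo
      have hlt : i < (T.length : Int) := by omega
      have hin : PySem.Raise.InRange T.length i := ⟨hlo, hlt⟩
      obtain ⟨t, hsome⟩ : ∃ t, PySem.List.pyGet? T i = some t := by
        cases h : PySem.List.pyGet? T i with
        | none => rw [PySem.List.pyGet?_eq_none_iff] at h; exact absurd hin h
        | some t => exact ⟨t, rfl⟩
      have helems : rezyElems T i = t :: rezyElems T (i + 1) := by
        unfold rezyElems
        rw [PySem.List.pyRange_one_cons hlt]
        simp [hsome]
      have hne : i ≠ (T.length : Int) := by omega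
      have hik : i + 1 = (T.length : Int) - k := by omega
      have hlo' : -(T.length : Int) ≤ i + 1 := by omega
      have hstep : rezystory x T i w =
          (if w = x then true else
            (rezystory x T (i + 1) (w + t) || rezystory x T (i + 1) (w - t) ||
              rezystory x T (i + 1) w)) := by
        rw [rezystory]
        by_cases hwx : w = x
        · simp [hwx]
        · simp only [hwx, if_false, hne, if_false]
          split
          · rename_i hnone; rw [hsome] at hnone; cases hnone
          · rename_i t' ht'; rw [hsome] at ht'; injection ht' with ht'; subst ht'
            by_cases h1 : rezystory x T (i + 1) (w + t) <;>
              by_cases h2 : rezystory x T (i + 1) (w - t) <;>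
                by_cases h3 : rezystory x T (i + 1) w <;> simp [h1, h2, h3]
      rw [hstep, helems]
      simp only [rezySpec, ih (i + 1) (w + t) hik hlo', ih (i + 1) (w - t) hik hlo',
        ih (i + 1) w hik hlo']
      by_cases hwx : w = x
      · simp [hwx]
      · have hfx : (w == x) = false := by simp [hwx]
        rw [if_neg hwx, hfx, Bool.false_or]
  intro i w h1 h2
  exact key ((T.length : Int) - i).toNat i w (by omega) h1

theorem rezyGo_eq_any (x : Int) (T : List Int) :
    ∀ (js : List Int) (reach : PySem.Set Int),
      (∀ j ∈ js, PySem.Raise.InRange T.length j) →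
      rezyGo x T js reach =
        reach.any (fun w => rezySpec x (js.map (fun j => (PySem.List.pyGet? T j).getD 0)) w) := by
  intro js
  induction js with
  | nil =>
    intro reach _
    rw [rezyGo, Bool.eq_iff_iff]
    simp only [PySem.Set.contains, List.contains_iff_exists_mem_beq, List.any_eq_true,
      rezySpec, List.map_nil, beq_iff_eq]
    constructor <;> (rintro ⟨w, hw, hwx⟩; exact ⟨w, hw, by omega⟩)
  | cons j js ih =>
    intro reach hmem
    obtain ⟨t, hsome⟩ : ∃ t, PySem.List.pyGet? T j = some t := by
      cases h : PySem.List.pyGet? T j with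
      | none => rw [PySem.List.pyGet?_eq_none_iff] at h; exact absurd (hmem j (by simp)) h
      | some t => exact ⟨t, rfl⟩
    by_cases hc : PySem.Set.contains reach x = true
    · have hx : x ∈ reach := by
        simp only [PySem.Set.contains, List.contains_iff_exists_mem_beq, beq_iff_eq] at hc
        obtain ⟨a, ha, h⟩ := hc
        subst h
        exact ha
      rw [rezyGo, if_pos hc, Bool.eq_iff_iff]
      simp only [true_iff, List.any_eq_true]
      exact ⟨x, hx, by simp [rezySpec, hsome]⟩
    · have hx : ¬ x ∈ reach := by
        intro h
        apply hc
        simp only [PySem.Set.contains, List.contains_iff_exists_mem_beq, beq_iff_eq]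
        exact ⟨x, h, rfl⟩
      have hred : rezyGo x T (j :: js) reach = rezyGo x T js (rezyStep t reach) := by
        rw [rezyGo, if_neg hc, hsome]
      rw [hred, ih (rezyStep t reach) (fun j hj => hmem j (by simp [hj]))]
      rw [Bool.eq_iff_iff]
      simp only [List.any_eq_true, rezyStep, PySem.Set.mem_ofList, List.mem_flatMap,
        List.map_cons, rezySpec, hsome, Option.getD_some, Bool.or_eq_true, beq_iff_eq]
      constructor
      · rintro ⟨y, ⟨w, hw, hy⟩, hSy⟩
        refine ⟨w, hw, ?_⟩
        simp only [List.mem_cons, List.not_mem_nil, or_false] at hy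
        rcases hy with h | h | h <;> subst h <;> tauto
      · rintro ⟨w, hw, h⟩
        rcases h with ((h | h) | h) | h
        · exact absurd (h ▸ hw) hx
        · exact ⟨w + t, ⟨w, hw, by simp⟩, h⟩
        · exact ⟨w - t, ⟨w, hw, by simp⟩, h⟩
        · exact ⟨w, ⟨w, hw, by simp⟩, h⟩

-- ===== VERDICT (by name: the statement is the Claim_ definition above) =====
theorem rezystory_spec : Claim_equal_rezystory := by
  intro x T i w _ hp
  unfold Spec_rezystory rezystory_alt
  by_cases hw : w = x
  · have hA : rezystory x T i w = true := by rw [rezystory]; simp [hw]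
    rw [hA]
    have hc : PySem.Set.contains (PySem.Set.ofList [w]) x = true := by
      simp [PySem.Set.ofList, PySem.Set.add, PySem.Set.empty, PySem.Set.contains, hw]
    cases hr : PySem.List.pyRange i (T.length : Int) 1 with
    | nil => rw [rezyGo, hc]
    | cons j js => rw [rezyGo, if_pos hc]
  · rcases hp with h | ⟨h1, h2⟩
    · exact absurd h hw
    · rw [rezystory_eq_spec x T i w h1 h2,
        rezyGo_eq_any x T _ _ (fun j hj => ?_)]
      · have : PySem.Set.ofList [w] = [w] := by rfl
        rw [this]
        simp [rezyElems]
      · rw [PySem.List.mem_pyRange_one] at hj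
        exact ⟨by omega, by omega⟩
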